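-- pv_equiv track=rewrite | github.com/M-panahandeh/ICPE2024 | v2.py | convert_to_paths
-- ===== SOURCE A (Python) =====
-- def convert_to_paths(relationships):
--     paths = []
--     current_path = []
--
--     for edge in relationships:
--         if not current_path:
--             current_path.append(edge[0])
--         if current_path[-1] == edge[0]:
--             current_path.append(edge[1])
--         else:
--             paths.append(current_path)
--             current_path = [edge[0], edge[1]]
--
--     if current_path:
--         paths.append(current_path)
--
--     return paths
-- ===== SOURCE B (Python) =====
-- def convert_to_paths(relationships):
--     rels = list(relationships)
--     n = len(rels)
--     if n == 0:
--         return []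
--     # pass 1: boundary table of run starts
--     starts = [0] + [i for i in range(1, n) if rels[i - 1][1] != rels[i][0]] + [n]
--     # pass 2: slice each run and build its path
--     return [[rels[s][0]] + [e[1] for e in rels[s:t]]
--             for s, t in zip(starts, starts[1:])]
-- ===== Notes on version B (the rewrite author's own statement) =====
-- stated objective: alternative
-- what changed: B replaces A's one-pass incremental state machine (a mutable current_path flushed on mismatch) by two staged passes: it first builds a boundary table of run-start indices (every i where rels[i-1][1] != rels[i][0]), then slices the list between consecutive boundaries and turns each slice into a path.
import Mathlib
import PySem

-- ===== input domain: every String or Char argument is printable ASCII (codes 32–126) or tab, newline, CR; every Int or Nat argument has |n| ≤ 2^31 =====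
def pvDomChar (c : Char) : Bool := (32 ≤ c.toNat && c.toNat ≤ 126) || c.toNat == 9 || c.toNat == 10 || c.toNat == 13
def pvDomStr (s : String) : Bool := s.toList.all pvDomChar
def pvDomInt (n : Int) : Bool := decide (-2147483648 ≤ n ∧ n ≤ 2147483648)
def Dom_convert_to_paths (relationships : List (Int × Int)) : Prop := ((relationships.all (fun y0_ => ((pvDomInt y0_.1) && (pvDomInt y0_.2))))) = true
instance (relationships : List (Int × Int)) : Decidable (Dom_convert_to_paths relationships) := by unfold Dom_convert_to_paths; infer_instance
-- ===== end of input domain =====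

-- B replaces A's incremental state machine by two staged passes: a boundary table of
-- run-start indices, then slicing each run into a path; same O(n), different decomposition.


-- ===== PORT A =====
-- one iteration of A's for-loop over the state (paths, current_path)
def cpStepA (st : List (List Int) × List Int) (e : Int × Int) : List (List Int) × List Int :=
  let cur := if st.2.isEmpty then st.2 ++ [e.1] else st.2
  if cur.getLast? = some e.1 then (st.1, cur ++ [e.2])
  else (st.1 ++ [cur], [e.1, e.2])

-- the trailing 'if current_path: paths.append(current_path)'
def cpFlushA (st : List (List Int) × List Int) : List (List Int) :=
  if st.2.isEmpty then st.1 else st.1 ++ [st.2]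

def convert_to_paths (relationships : List (Int × Int)) : List (List Int) :=
  cpFlushA (relationships.foldl cpStepA ([], []))

-- ===== PORT B =====
-- pass 1 of Source B: [i for i in range(1, n) if rels[i-1][1] != rels[i][0]]
-- (getD is exact here: every produced index is in range)
def cpBreaks (rels : List (Int × Int)) : List Nat :=
  (List.range' 1 (rels.length - 1)).filter
    (fun i => (rels.getD (i - 1) (0, 0)).2 != (rels.getD i (0, 0)).1)

-- one path from the slice rels[s:t]: [rels[s][0]] + [e[1] for e in rels[s:t]]
-- (drop/take is exact for the in-range slice 0 ≤ s ≤ t ≤ n that Source B produces)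
def cpPath (rels : List (Int × Int)) (s t : Nat) : List Int :=
  (rels.getD s (0, 0)).1 :: ((rels.drop s).take (t - s)).map Prod.snd

def convert_to_paths_alt (relationships : List (Int × Int)) : List (List Int) :=
  if relationships.length = 0 then []
  else
    let starts : List Nat := 0 :: cpBreaks relationships ++ [relationships.length]
    (starts.zip starts.tail).map (fun p => cpPath relationships p.1 p.2)

-- ===== PRECONDITION & SPEC =====
def Spec_convert_to_paths (relationships : List (Int × Int)) (out : List (List Int)) : Prop := out = convert_to_paths_alt relationships
instance (relationships : List (Int × Int)) (out : List (List Int)) : Decidable (Spec_convert_to_paths relationships out) := by unfold Spec_convert_to_paths; infer_instance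

-- ===== CLAIM (what is proved, stated in full; the proofs are below) =====
def Claim_equal_convert_to_paths : Prop := ∀ (relationships : List (Int × Int)), Dom_convert_to_paths relationships → Spec_convert_to_paths relationships (convert_to_paths relationships)

-- ===== LEMMAS AND PROOFS =====
-- proof-side bridge: run extraction as a recursion (used by both directions of the proof)
def cpRun (last : Int) : List (Int × Int) → List Int × List (Int × Int)
  | [] => ([], [])
  | e :: rest =>
    if e.1 = last then (e.2 :: (cpRun e.2 rest).1, (cpRun e.2 rest).2)
    else ([], e :: rest)

theorem cpRun_rest_le (last : Int) (xs : List (Int × Int)) :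
    (cpRun last xs).2.length ≤ xs.length := by
  induction xs generalizing last with
  | nil => simp [cpRun]
  | cons e rest ih =>
    simp only [cpRun]
    split
    · exact le_trans (ih e.2) (Nat.le_succ _)
    · simp

def cpAlt (relationships : List (Int × Int)) : List (List Int) :=
  match relationships with
  | [] => []
  | e :: rest =>
    ([e.1, e.2] ++ (cpRun e.2 rest).1) :: cpAlt (cpRun e.2 rest).2
termination_by relationships.length
decreasing_by
  simpa using Nat.lt_succ_of_le (cpRun_rest_le e.2 rest)

-- A = cpAlt: invariant of A's loop
theorem cpFold_inv (xs : List (Int × Int)) (paths : List (List Int)) (cur : List Int)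
    (l : Int) (hcur : cur ≠ []) (hl : cur.getLast? = some l) :
    cpFlushA (xs.foldl cpStepA (paths, cur)) =
    paths ++ (cur ++ (cpRun l xs).1) :: cpAlt (cpRun l xs).2 := by
  induction xs generalizing paths cur l with
  | nil =>
    simp [cpRun, cpFlushA, cpAlt, hcur]
  | cons e rest ih =>
    have hne : cur.isEmpty = false := by simpa using hcur
    simp only [List.foldl_cons, cpStepA, hne, Bool.false_eq_true, if_false, hl, cpRun]
    by_cases he : e.1 = l
    · subst he
      rw [if_pos rfl, if_pos rfl,
        ih paths (cur ++ [e.2]) e.2 (by simp) (by simp)]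
      simp
    · rw [if_neg (by simpa using fun h => he h.symm), if_neg he,
        ih (paths ++ [cur]) [e.1, e.2] e.2 (by simp) (by simp),
        cpAlt]
      simp

theorem a_eq_cpAlt (rels : List (Int × Int)) : convert_to_paths rels = cpAlt rels := by
  unfold convert_to_paths
  cases rels with
  | nil => simp [cpAlt, cpFlushA]
  | cons e rest =>
    simp only [List.foldl_cons, cpStepA, List.isEmpty_nil, if_true, List.nil_append,
      List.getLast?_singleton, List.singleton_append]
    rw [cpFold_inv rest [] [e.1, e.2] e.2 (by simp) (by simp), cpAlt]
    simp

-- B-side lemmas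
theorem alt_expand (rels : List (Int × Int)) (h : rels ≠ []) :
    convert_to_paths_alt rels =
      ((0 :: (cpBreaks rels ++ [rels.length])).zip (cpBreaks rels ++ [rels.length])).map
        (fun p => cpPath rels p.1 p.2) := by
  unfold convert_to_paths_alt
  rw [if_neg (by simpa using h)]
  rfl

theorem cpBreaks_cons (e f : Int × Int) (rest : List (Int × Int)) :
    cpBreaks (e :: f :: rest) =
      (if e.2 != f.1 then [1] else []) ++ (cpBreaks (f :: rest)).map (· + 1) := by
  unfold cpBreaks
  have h1 : (e :: f :: rest).length - 1 = rest.length + 1 := by simp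
  have h2 : (f :: rest).length - 1 = rest.length := by simp
  rw [h1, h2, List.range'_succ, List.filter_cons]
  have hmap : List.range' 2 rest.length = (List.range' 1 rest.length).map (· + 1) := by
    rw [List.range'_eq_map_range, List.range'_eq_map_range, List.map_map]
    apply List.map_congr_left; intro i _; simp; omega
  rw [hmap, List.filter_map]
  have hfilt : List.filter
      ((fun i => ((e :: f :: rest).getD (i - 1) (0, 0)).2 != ((e :: f :: rest).getD i (0, 0)).1) ∘ (· + 1))
      (List.range' 1 rest.length)
      = List.filter (fun i => ((f :: rest).getD (i - 1) (0, 0)).2 != ((f :: rest).getD i (0, 0)).1)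
        (List.range' 1 rest.length) := by
    apply List.filter_congr
    intro i hi
    obtain ⟨j, -, hij⟩ := List.mem_range'.mp hi
    obtain rfl : i = j + 1 := by omega
    simp [List.getD]
  rw [hfilt]
  by_cases he : e.2 = f.1 <;> simp [List.getD, he]

theorem cpPath_shift (x : Int × Int) (xs : List (Int × Int)) (s t : Nat) :
    cpPath (x :: xs) (s + 1) (t + 1) = cpPath xs s t := by
  simp [cpPath, List.getD, Nat.succ_sub_succ]

theorem zip_tail_map_succ (l : List Nat) :
    ((l.map (· + 1)).zip (l.map (· + 1)).tail) =
      (l.zip l.tail).map (fun p => (p.1 + 1, p.2 + 1)) := by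
  cases l with
  | nil => simp
  | cons a t =>
    show ((a :: t).map (· + 1)).zip (t.map (· + 1)) = _
    rw [List.zip_map]
    simp [Prod.map]

-- the cons-cons recurrence of B's port
theorem alt_cons_cons (e f : Int × Int) (rest : List (Int × Int)) :
    convert_to_paths_alt (e :: f :: rest) =
      if e.2 = f.1 then
        match convert_to_paths_alt (f :: rest) with
        | [] => []
        | p :: ps => (e.1 :: p) :: ps
      else [e.1, e.2] :: convert_to_paths_alt (f :: rest) := by
  obtain ⟨t, ts, hts⟩ : ∃ t ts, cpBreaks (f :: rest) ++ [(f :: rest).length] = t :: ts := by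
    cases h : cpBreaks (f :: rest) with
    | nil => exact ⟨(f :: rest).length, [], by simp⟩
    | cons b bs => exact ⟨b, bs ++ [(f :: rest).length], by simp⟩
  have hfr : convert_to_paths_alt (f :: rest) =
      cpPath (f :: rest) 0 t :: ((t :: ts).zip ts).map (fun p => cpPath (f :: rest) p.1 p.2) := by
    rw [alt_expand _ (by simp), hts, List.zip_cons_cons, List.map_cons]
  have hlenmap : ([(e :: f :: rest).length] : List Nat) = [(f :: rest).length].map (· + 1) := by
    simp
  rw [alt_expand _ (by simp), hfr]
  by_cases he : e.2 = f.1
  · -- chain continues: no break at index 1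
    have hb : cpBreaks (e :: f :: rest) ++ [(e :: f :: rest).length]
        = (t + 1) :: ts.map (· + 1) := by
      rw [cpBreaks_cons, he, bne_self_eq_false, if_neg (by simp), List.nil_append,
        hlenmap, ← List.map_append, hts, List.map_cons]
    rw [if_pos he, hb, List.zip_cons_cons, List.map_cons]
    have hz := zip_tail_map_succ (t :: ts)
    simp only [List.map_cons, List.tail_cons] at hz
    rw [hz, List.map_map]
    congr 1
    · simp only [cpPath, List.getD_cons_zero, Nat.sub_zero, List.drop_zero,
        List.take_succ_cons, List.map_cons]
      rw [he]
    · apply List.map_congr_left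
      intro p _
      exact cpPath_shift e (f :: rest) p.1 p.2
  · -- break at index 1
    have hb : cpBreaks (e :: f :: rest) ++ [(e :: f :: rest).length]
        = 1 :: (t + 1) :: ts.map (· + 1) := by
      rw [cpBreaks_cons, if_pos (by simpa using he), List.singleton_append,
        hlenmap, List.cons_append, ← List.map_append, hts, List.map_cons]
    rw [if_neg he, hb, List.zip_cons_cons, List.map_cons]
    have hz := zip_tail_map_succ (0 :: t :: ts)
    simp only [List.map_cons, List.tail_cons] at hz
    rw [show ((1 : Nat) :: (t + 1) :: ts.map (· + 1)) = (0 + 1) :: (t + 1) :: ts.map (· + 1) from rfl,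
      hz, List.map_map]
    congr 1
    rw [List.zip_cons_cons, List.map_cons]
    exact congrArg₂ List.cons (cpPath_shift e (f :: rest) 0 t)
      (List.map_congr_left (fun (p : Nat × Nat) _ => cpPath_shift e (f :: rest) p.1 p.2))

theorem alt_eq_cpAlt : ∀ rels, convert_to_paths_alt rels = cpAlt rels
  | [] => by simp [convert_to_paths_alt, cpAlt]
  | [e] => by
    simp [convert_to_paths_alt, cpBreaks, cpPath, cpAlt, cpRun]
  | e :: f :: rest => by
    rw [alt_cons_cons, alt_eq_cpAlt (f :: rest)]
    by_cases he : e.2 = f.1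
    · rw [if_pos he]
      conv_lhs => rw [cpAlt]
      conv_rhs => rw [cpAlt]
      simp only [cpRun]
      rw [if_pos he.symm]
      simp [he]
    · rw [if_neg he]
      conv_rhs => rw [cpAlt]
      simp only [cpRun]
      rw [if_neg (fun h => he h.symm)]
      simp

-- ===== VERDICT (by name: the statement is the Claim_ definition above) =====
theorem convert_to_paths_spec : Claim_equal_convert_to_paths := by
  intro rels _
  unfold Spec_convert_to_paths
  rw [a_eq_cpAlt, alt_eq_cpAlt]
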